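-- pv_equiv track=rewrite | github.com/nastyh/LeetCode | Basic Data Structures/2115_find_all_possible_recipes_from_given_supplies.py | findAllRecipes_dfs
-- ===== SOURCE A (Python) =====
-- from typing import List
--
-- def findAllRecipes_dfs(recipes: List[str], ingredients: List[List[str]], supplies: List[str]) -> List[str]:
--     recipe_map = {recipe: ing for recipe, ing in zip(recipes, ingredients)}
--     supply_set = set(supplies)
--     memo = {}
--     visiting = set()
--     def _helper(recipe):
--         if recipe in supply_set:
--             return True
--         if recipe not in recipe_map:
--             return False
--         if recipe in memo:
--             return memo[recipe]
--         if recipe in visiting: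
--             return False  # cycle detected
--
--         visiting.add(recipe)
--         for ing in recipe_map[recipe]:
--             if not _helper(ing):
--                 visiting.remove(recipe)
--                 memo[recipe] = False
--                 return False
--         visiting.remove(recipe)
--         memo[recipe] = True
--         supply_set.add(recipe)  # once made, it's available
--         return True
--
--     return [r for r in recipes if _helper(r)]
-- ===== SOURCE B (Python) =====
-- from typing import List
--
-- def findAllRecipes_dfs(recipes: List[str], ingredients: List[List[str]], supplies: List[str]) -> List[str]:
--     # Iterative fixed-point: repeatedly sweep the recipe map, marking a recipe
--     # available once all its ingredients are available, until no sweep changes anything.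
--     recipe_map = dict(zip(recipes, ingredients))
--     avail = set(supplies)
--     changed = True
--     while changed:
--         changed = False
--         for r, deps in recipe_map.items():
--             if r not in avail and all(d in avail for d in deps):
--                 avail.add(r)
--                 changed = True
--     return [r for r in recipes if r in avail]
-- ===== Notes on version B (the rewrite author's own statement) =====
-- stated objective: alternative
-- what changed: Replaces the recursive memoized DFS with cycle detection (memo/visiting sets, mutable supply set) by an iterative fixed-point: repeatedly sweep the recipe map marking a recipe available once all its ingredients are available, until a sweep changes nothing, then filter the recipe list by availability.
import Mathlib
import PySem

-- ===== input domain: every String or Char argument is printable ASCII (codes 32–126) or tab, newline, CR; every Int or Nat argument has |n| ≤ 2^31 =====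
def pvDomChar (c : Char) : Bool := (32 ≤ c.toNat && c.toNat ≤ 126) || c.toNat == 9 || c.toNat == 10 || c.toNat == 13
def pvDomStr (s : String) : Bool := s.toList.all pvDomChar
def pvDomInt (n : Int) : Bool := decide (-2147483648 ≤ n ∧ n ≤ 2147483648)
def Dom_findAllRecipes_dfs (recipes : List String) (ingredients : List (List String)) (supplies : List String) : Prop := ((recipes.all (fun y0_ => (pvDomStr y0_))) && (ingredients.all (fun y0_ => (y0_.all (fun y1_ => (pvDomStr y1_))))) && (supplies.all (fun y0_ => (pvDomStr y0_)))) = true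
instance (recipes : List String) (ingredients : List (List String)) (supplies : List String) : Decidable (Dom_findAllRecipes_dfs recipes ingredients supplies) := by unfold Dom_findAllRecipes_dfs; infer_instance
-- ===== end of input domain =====

-- B replaces A's recursive memoized DFS (memo/visiting sets, cycle detection) by an
-- iterative fixed-point sweep over the recipe map; same return value, similar cost (objective: alternative).


-- ===== PORT A =====
-- state of A's closures: memo dict, visiting set, supply set
structure StA where
  memo : PySem.Dict String Bool
  vis  : PySem.Set String
  sup  : PySem.Set String
deriving Repr, DecidableEq

-- _helper / its 'for ing in recipe_map[recipe]' loop, as mutual recursion.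
-- Python has no fuel; fuel (recipes.length + 1) is always sufficient (proved in the
-- equivalence proof via the visiting-set invariant), so the 0-fuel branch is unreachable.
-- 'visiting.remove(recipe)' is ported as Set.discard: it is exact here because recipe is
-- always a member at the removal points (Python's KeyError is impossible).
mutual
def helperA (rm : PySem.Dict String (List String)) : Nat → String → StA → Bool × StA
  | 0, _, st => (false, st)
  | fuel+1, x, st =>
    if PySem.Set.contains st.sup x then (true, st)
    else
      match rm.get? x with
      | none => (false, st)
      | some ds =>
        match st.memo.get? x with
        | some b => (b, st)
        | none =>
          if PySem.Set.contains st.vis x then (false, st)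
          else
            let st1 : StA := { st with vis := PySem.Set.add st.vis x }
            match loopA rm fuel ds st1 with
            | (false, st2) =>
                (false, { st2 with vis := PySem.Set.discard st2.vis x,
                                   memo := st2.memo.insert x false })
            | (true, st2) =>
                (true, { st2 with vis := PySem.Set.discard st2.vis x,
                                  memo := st2.memo.insert x true,
                                  sup := PySem.Set.add st2.sup x })
  termination_by fuel _ _ => (fuel, 0)

def loopA (rm : PySem.Dict String (List String)) : Nat → List String → StA → Bool × StA
  | _, [], st => (true, st)
  | fuel, d :: ds, st =>
    match helperA rm fuel d st with
    | (false, st') => (false, st')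
    | (true, st') => loopA rm fuel ds st'
  termination_by fuel ds _ => (fuel, ds.length + 1)
end

def findAllRecipes_dfs (recipes : List String) (ingredients : List (List String)) (supplies : List String) : List String :=
  let rm : PySem.Dict String (List String) :=
    (recipes.zip ingredients).foldl (fun d p => d.insert p.1 p.2) PySem.Dict.empty
  let st0 : StA := ⟨PySem.Dict.empty, PySem.Set.empty, PySem.Set.ofList supplies⟩
  (recipes.foldl (fun acc r =>
      match helperA rm (recipes.length + 1) r acc.2 with
      | (b, st') => (if b then acc.1 ++ [r] else acc.1, st'))
    (([] : List String), st0)).1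

-- ===== PORT B =====
-- one sweep 'for r, deps in recipe_map.items(): ...' threading (avail, changed)
def passB : List (String × List String) → PySem.Set String → Bool → PySem.Set String × Bool
  | [], avail, ch => (avail, ch)
  | (r, ds) :: rest, avail, ch =>
    if !(PySem.Set.contains avail r) && ds.all (fun d => PySem.Set.contains avail d) then
      passB rest (PySem.Set.add avail r) true
    else
      passB rest avail ch

-- 'while changed:' — Python terminates after at most (#keys + 1) sweeps, so fuel
-- (recipes.length + 1) is always sufficient (proved below); the 0-fuel branch is unreachable.
def loopB (items : List (String × List String)) : Nat → PySem.Set String → PySem.Set String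
  | 0, avail => avail
  | fuel+1, avail =>
    match passB items avail false with
    | (a', true) => loopB items fuel a'
    | (a', false) => a'

def findAllRecipes_dfs_alt (recipes : List String) (ingredients : List (List String)) (supplies : List String) : List String :=
  let rm : PySem.Dict String (List String) :=
    (recipes.zip ingredients).foldl (fun d p => d.insert p.1 p.2) PySem.Dict.empty
  let avail := loopB rm.items (recipes.length + 1) (PySem.Set.ofList supplies)
  recipes.filter (fun r => PySem.Set.contains avail r)

-- ===== PRECONDITION & SPEC =====
def Spec_findAllRecipes_dfs (recipes : List String) (ingredients : List (List String)) (supplies : List String) (out : List String) : Prop := out = findAllRecipes_dfs_alt recipes ingredients supplies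
instance (recipes : List String) (ingredients : List (List String)) (supplies : List String) (out : List String) : Decidable (Spec_findAllRecipes_dfs recipes ingredients supplies out) := by unfold Spec_findAllRecipes_dfs; infer_instance

-- ===== CLAIM (what is proved, stated in full; the proofs are below) =====
def Claim_equal_findAllRecipes_dfs : Prop := ∀ (recipes : List String) (ingredients : List (List String)) (supplies : List String), Dom_findAllRecipes_dfs recipes ingredients supplies → Spec_findAllRecipes_dfs recipes ingredients supplies (findAllRecipes_dfs recipes ingredients supplies)

-- ===== LEMMAS AND PROOFS =====

-- 'x is makeable': the least fixed point both programs compute.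
inductive Mk (rm : PySem.Dict String (List String)) (sup0 : List String) : String → Prop
  | sup {x : String} (h : x ∈ sup0) : Mk rm sup0 x
  | step {x : String} {ds : List String} (h : rm.get? x = some ds)
      (hds : ∀ d ∈ ds, Mk rm sup0 d) : Mk rm sup0 x

-- the DFS stack: vis = [v1,...,vk] with a dependency edge v1→v2→…→vk→x, every vi a
-- recipe key not in the initial supplies
def Chain (rm : PySem.Dict String (List String)) (sup0 : List String) : List String → String → Prop
  | [], _ => True
  | v :: vs, x =>
      v ∉ sup0 ∧ (∃ ds, rm.get? v = some ds ∧ vs.headD x ∈ ds) ∧ Chain rm sup0 vs x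

def InvA (rm : PySem.Dict String (List String)) (sup0 : List String) (st : StA) : Prop :=
  (∀ x b, st.memo.get? x = some b → (b = true ↔ Mk rm sup0 x)) ∧
  (∀ x, x ∈ st.sup → Mk rm sup0 x) ∧
  (∀ x ∈ sup0, x ∈ st.sup)

lemma chain_snoc (rm : PySem.Dict String (List String)) (sup0 : List String)
    (vis : List String) (x d : String) (hch : Chain rm sup0 vis x)
    (hx : x ∉ sup0) (ds : List String) (hget : rm.get? x = some ds) (hd : d ∈ ds) :
    Chain rm sup0 (vis ++ [x]) d := by
  induction vis with
  | nil => exact ⟨hx, ⟨ds, hget, hd⟩, trivial⟩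
  | cons v vs ih =>
    obtain ⟨h1, ⟨ds', hg', hm'⟩, h3⟩ := hch
    refine ⟨h1, ⟨ds', hg', ?_⟩, ih h3⟩
    cases vs <;> simpa using hm'

lemma chain_cycle_not_mk (rm : PySem.Dict String (List String)) (sup0 : List String)
    (x : String) (L : List String) (hL : Chain rm sup0 (x :: L) x) :
    ¬ Mk rm sup0 x := by
  intro hx
  suffices aux : ∀ y, Mk rm sup0 y → ∀ l, Chain rm sup0 (y :: l) x → False from aux x hx L hL
  intro y hy
  induction hy with
  | sup h => intro l hch; exact hch.1 h
  | step hg hds ih =>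
    intro l hch
    obtain ⟨_, ⟨ds', hg', hm'⟩, hrest⟩ := hch
    rw [hg] at hg'; cases hg'
    cases l with
    | nil => exact ih x (by simpa using hm') L hL
    | cons w l' => exact ih w (by simpa using hm') l' hrest

lemma chain_mem_not_mk (rm : PySem.Dict String (List String)) (sup0 : List String) :
    ∀ (vis : List String) (x : String), Chain rm sup0 vis x → x ∈ vis → ¬ Mk rm sup0 x := by
  intro vis
  induction vis with
  | nil => intro x _ hx; cases hx
  | cons v vs ih =>
    intro x hch hx
    rcases List.mem_cons.1 hx with h | h
    · subst h; exact chain_cycle_not_mk rm sup0 x vs hch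
    · exact ih x hch.2.2 h

lemma chain_mem_keys (rm : PySem.Dict String (List String)) (sup0 : List String) :
    ∀ (vis : List String) (x : String), Chain rm sup0 vis x → ∀ v ∈ vis, v ∈ rm.keys := by
  intro vis
  induction vis with
  | nil => intro x _ v hv; cases hv
  | cons w vs ih =>
    intro x hch v hv
    rcases List.mem_cons.1 hv with h | h
    · subst h
      obtain ⟨_, ⟨ds, hg, _⟩, _⟩ := hch
      have : ¬ (rm.get? v = none) := by simp [hg]
      by_contra hk
      exact this ((PySem.Dict.get?_eq_none_iff_not_mem_keys rm v).2 hk)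
    · exact ih x hch.2.2 v h

-- ===== A-side master lemmas =====
lemma discard_append_singleton (vis : List String) (x : String) (h : x ∉ vis) :
    PySem.Set.discard (vis ++ [x]) x = vis := by
  simp only [PySem.Set.discard, List.filter_append, BEq.rfl, Bool.not_true, Bool.false_eq_true,
    not_false_eq_true, List.filter_cons_of_neg, List.filter_nil, List.append_nil,
    List.filter_eq_self, Bool.not_eq_eq_eq_not, beq_eq_false_iff_ne, ne_eq]
  intro a ha heq
  exact h (heq ▸ ha)

lemma loopA_spec_of (rm : PySem.Dict String (List String)) (sup0 : List String) (fuel : Nat)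
    (hP : ∀ (x : String) (st : StA), InvA rm sup0 st → st.vis.Nodup →
      Chain rm sup0 st.vis x → rm.keys.length + 1 ≤ fuel + st.vis.length →
      (((helperA rm fuel x st).1 = true) ↔ Mk rm sup0 x) ∧
      InvA rm sup0 (helperA rm fuel x st).2 ∧ (helperA rm fuel x st).2.vis = st.vis) :
    ∀ (ds : List String) (st : StA), InvA rm sup0 st → st.vis.Nodup →
      (∀ d ∈ ds, Chain rm sup0 st.vis d) → rm.keys.length + 1 ≤ fuel + st.vis.length →
      (((loopA rm fuel ds st).1 = true) ↔ ∀ d ∈ ds, Mk rm sup0 d) ∧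
      InvA rm sup0 (loopA rm fuel ds st).2 ∧ (loopA rm fuel ds st).2.vis = st.vis := by
  intro ds
  induction ds with
  | nil =>
    intro st hinv _ _ _
    refine ⟨by simp [loopA], ?_, ?_⟩
    · simpa only [loopA] using hinv
    · simp only [loopA]
  | cons d ds ih =>
    intro st hinv hnd hch hfu
    have hd := hP d st hinv hnd (hch d List.mem_cons_self) hfu
    rcases heq : helperA rm fuel d st with ⟨b, st'⟩
    rw [heq] at hd
    simp only [loopA, heq]
    cases b with
    | false =>
      refine ⟨?_, hd.2.1, hd.2.2⟩
      simp only [Bool.false_eq_true, false_iff]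
      intro hall
      exact Bool.noConfusion (hd.1.mpr (hall d List.mem_cons_self))
    | true =>
      have hmkd : Mk rm sup0 d := hd.1.mp rfl
      have hnd' : st'.vis.Nodup := by rw [hd.2.2]; exact hnd
      have hch' : ∀ e ∈ ds, Chain rm sup0 st'.vis e := by
        intro e he; rw [hd.2.2]; exact hch e (List.mem_cons_of_mem _ he)
      have hfu' : rm.keys.length + 1 ≤ fuel + st'.vis.length := by rw [hd.2.2]; exact hfu
      have hrec := ih st' hd.2.1 hnd' hch' hfu'
      refine ⟨?_, hrec.2.1, by rw [hrec.2.2, hd.2.2]⟩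
      rw [hrec.1]
      constructor
      · intro hall e he
        rcases List.mem_cons.1 he with he | he
        · exact he ▸ hmkd
        · exact hall e he
      · intro hall e he
        exact hall e (List.mem_cons_of_mem _ he)

lemma helperA_spec (rm : PySem.Dict String (List String)) (sup0 : List String) :
    ∀ (fuel : Nat) (x : String) (st : StA), InvA rm sup0 st → st.vis.Nodup →
      Chain rm sup0 st.vis x → rm.keys.length + 1 ≤ fuel + st.vis.length →
      (((helperA rm fuel x st).1 = true) ↔ Mk rm sup0 x) ∧
      InvA rm sup0 (helperA rm fuel x st).2 ∧ (helperA rm fuel x st).2.vis = st.vis := by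
  intro fuel
  induction fuel with
  | zero =>
    intro x st _ hnd hch hfu
    exfalso
    have hsub : st.vis ⊆ rm.keys := fun v hv => chain_mem_keys rm sup0 st.vis x hch v hv
    have := (List.Nodup.subperm hnd hsub).length_le
    omega
  | succ f ih =>
    intro x st hinv hnd hch hfu
    simp only [helperA]
    by_cases hsup : PySem.Set.contains st.sup x = true
    · rw [if_pos hsup]
      exact ⟨by simp [hinv.2.1 x ((PySem.Set.contains_iff _ _).1 hsup)], hinv, rfl⟩
    · rw [if_neg hsup]
      have hxsup : x ∉ st.sup := fun hmem => hsup ((PySem.Set.contains_iff _ _).2 hmem)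
      rcases hget : rm.get? x with _ | ds
      · dsimp only
        refine ⟨?_, hinv, rfl⟩
        simp only [Bool.false_eq_true, false_iff]
        intro hmk
        cases hmk with
        | sup h => exact hxsup (hinv.2.2 x h)
        | step h _ => rw [hget] at h; cases h
      · dsimp only
        rcases hmemo : st.memo.get? x with _ | b
        · dsimp only
          by_cases hvis : PySem.Set.contains st.vis x = true
          · rw [if_pos hvis]
            refine ⟨?_, hinv, rfl⟩
            simp only [Bool.false_eq_true, false_iff]
            exact chain_mem_not_mk rm sup0 st.vis x hch ((PySem.Set.contains_iff _ _).1 hvis)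
          · rw [if_neg hvis]
            have hxvis : x ∉ st.vis := fun hmem => hvis ((PySem.Set.contains_iff _ _).2 hmem)
            have hxsup0 : x ∉ sup0 := fun h0 => hxsup (hinv.2.2 x h0)
            have hadd : PySem.Set.add st.vis x = st.vis ++ [x] := PySem.Set.add_of_not_mem hxvis
            have hst1inv : InvA rm sup0 ⟨st.memo, PySem.Set.add st.vis x, st.sup⟩ := hinv
            have hnd1 : (st.vis ++ [x]).Nodup := by
              simp [List.nodup_append, hnd]
              intro a ha heq
              exact hxvis (heq ▸ ha)
            have hch1 : ∀ d ∈ ds, Chain rm sup0 (st.vis ++ [x]) d := fun d hd =>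
              chain_snoc rm sup0 st.vis x d hch hxsup0 ds hget hd
            have hfu1 : rm.keys.length + 1 ≤ f + (st.vis ++ [x]).length := by
              simp only [List.length_append, List.length_cons, List.length_nil]
              omega
            have hloop := loopA_spec_of rm sup0 f (ih) ds ⟨st.memo, st.vis ++ [x], st.sup⟩
              hinv hnd1 hch1 (by simpa using hfu1)
            rw [hadd]
            rcases heq : loopA rm f ds ⟨st.memo, st.vis ++ [x], st.sup⟩ with ⟨bl, st2⟩
            rw [heq] at hloop
            have hvis2 : st2.vis = st.vis ++ [x] := hloop.2.2
            have hdisc : PySem.Set.discard st2.vis x = st.vis := by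
              rw [hvis2]; exact discard_append_singleton st.vis x hxvis
            have hnotmk : ¬ (∀ d ∈ ds, Mk rm sup0 d) → ¬ Mk rm sup0 x := by
              intro hnall hmk
              cases hmk with
              | sup h => exact hxsup0 h
              | step h hds =>
                rw [hget] at h
                cases h
                exact hnall hds
            have hmk_of : (∀ d ∈ ds, Mk rm sup0 d) → Mk rm sup0 x := fun hds => Mk.step hget hds
            have hmemo2 : ∀ (y : String) (b' : Bool) (bv : Bool),
                (b' = true ↔ (bv = true ↔ Mk rm sup0 x) → False) → True := fun _ _ _ _ => trivial
            -- go by cases on the loop result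
            cases bl with
            | false =>
              dsimp only
              have hnall : ¬ (∀ d ∈ ds, Mk rm sup0 d) := fun hall =>
                Bool.noConfusion (hloop.1.mpr hall)
              have hnmk := hnotmk hnall
              refine ⟨by simp [hnmk], ?_, by simpa using hdisc⟩
              refine ⟨?_, ?_, ?_⟩
              · intro y b' hy
                simp only at hy
                rw [PySem.Dict.get?_insert] at hy
                by_cases hyx : y = x
                · rw [if_pos hyx] at hy
                  cases hy
                  subst hyx
                  simp [hnmk]
                · rw [if_neg hyx] at hy
                  exact hloop.2.1.1 y b' hy
              · intro y hy
                exact hloop.2.1.2.1 y hy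
              · intro y hy
                exact hloop.2.1.2.2 y hy
            | true =>
              dsimp only
              have hall : ∀ d ∈ ds, Mk rm sup0 d := hloop.1.mp rfl
              have hmk := hmk_of hall
              refine ⟨by simp [hmk], ?_, by simpa using hdisc⟩
              refine ⟨?_, ?_, ?_⟩
              · intro y b' hy
                simp only at hy
                rw [PySem.Dict.get?_insert] at hy
                by_cases hyx : y = x
                · rw [if_pos hyx] at hy
                  cases hy
                  subst hyx
                  simp [hmk]
                · rw [if_neg hyx] at hy
                  exact hloop.2.1.1 y b' hy
              · intro y hy
                simp only at hy
                rcases (PySem.Set.mem_add _ _ _).1 hy with hy | hy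
                · exact hloop.2.1.2.1 y hy
                · exact hy ▸ hmk
              · intro y hy
                exact (PySem.Set.mem_add _ _ _).2 (Or.inl (hloop.2.1.2.2 y hy))
        · dsimp only
          exact ⟨hinv.1 x b hmemo, hinv, rfl⟩

-- A's top-level fold produces a filter of recipes
lemma foldA_filter (rm : PySem.Dict String (List String)) (sup0 : List String) (fuel : Nat)
    (p : String → Bool) (hp : ∀ r, p r = true ↔ Mk rm sup0 r)
    (hK : rm.keys.length + 1 ≤ fuel) :
    ∀ (l : List String) (acc : List String) (st : StA), InvA rm sup0 st → st.vis = [] →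
      (l.foldl (fun acc r =>
        match helperA rm fuel r acc.2 with
        | (b, st') => (if b then acc.1 ++ [r] else acc.1, st')) (acc, st)).1
      = acc ++ l.filter p := by
  intro l
  induction l with
  | nil => intro acc st _ _; simp
  | cons r l ih =>
    intro acc st hinv hv
    have hnd : st.vis.Nodup := by rw [hv]; exact List.nodup_nil
    have hch : Chain rm sup0 st.vis r := by rw [hv]; trivial
    have hfu : rm.keys.length + 1 ≤ fuel + st.vis.length := by
      rw [hv]; simpa using hK
    have hsp := helperA_spec rm sup0 fuel r st hinv hnd hch hfu
    rcases heq : helperA rm fuel r st with ⟨b, st'⟩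
    rw [heq] at hsp
    have hb : b = p r := by
      rw [Bool.eq_iff_iff, hsp.1, hp r]
    have hv' : st'.vis = [] := by rw [hsp.2.2]; exact hv
    rw [List.foldl_cons]
    have hstep : (match helperA rm fuel r (acc, st).2 with
        | (b, st') => (if b = true then (acc, st).1 ++ [r] else (acc, st).1, st'))
        = (if b = true then acc ++ [r] else acc, st') := by
      show (if (helperA rm fuel r st).1 = true then acc ++ [r] else acc,
        (helperA rm fuel r st).2) = _
      rw [heq]
    rw [hstep]
    cases hpr : p r with
    | true =>
      rw [hb, hpr, if_pos rfl]
      rw [ih (acc ++ [r]) st' hsp.2.1 hv']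
      rw [List.filter_cons, hpr]
      simp
    | false =>
      rw [hb, hpr, if_neg Bool.false_ne_true]
      rw [ih acc st' hsp.2.1 hv']
      rw [List.filter_cons, hpr]
      simp

-- ===== B-side lemmas =====
lemma passB_mono : ∀ (items : List (String × List String)) (avail : PySem.Set String) (ch : Bool)
    (y : String), y ∈ avail → y ∈ (passB items avail ch).1 := by
  intro items
  induction items with
  | nil => intro avail ch y hy; simpa [passB] using hy
  | cons p rest ih =>
    obtain ⟨r, ds⟩ := p
    intro avail ch y hy
    by_cases h : (!(PySem.Set.contains avail r) && ds.all (fun d => PySem.Set.contains avail d)) = true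
    · rw [passB]; rw [if_pos h]; exact ih _ _ y ((PySem.Set.mem_add _ _ _).2 (Or.inl hy))
    · rw [passB]; rw [if_neg h]; exact ih _ _ y hy

lemma passB_sound (rm : PySem.Dict String (List String)) (sup0 : List String) :
    ∀ (items : List (String × List String)) (avail : PySem.Set String) (ch : Bool),
      (∀ p ∈ items, rm.get? p.1 = some p.2) → (∀ y ∈ avail, Mk rm sup0 y) →
      ∀ y ∈ (passB items avail ch).1, Mk rm sup0 y := by
  intro items
  induction items with
  | nil => intro avail ch _ hav y hy; exact hav y (by simpa [passB] using hy)
  | cons p rest ih =>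
    obtain ⟨r, ds⟩ := p
    intro avail ch hit hav y hy
    by_cases h : (!(PySem.Set.contains avail r) && ds.all (fun d => PySem.Set.contains avail d)) = true
    · rw [passB] at hy; rw [if_pos h] at hy
      refine ih _ _ (fun q hq => hit q (List.mem_cons_of_mem _ hq)) ?_ y hy
      intro z hz
      rcases (PySem.Set.mem_add _ _ _).1 hz with hz | hz
      · exact hav z hz
      · subst hz
        have hget : rm.get? z = some ds := hit (z, ds) List.mem_cons_self
        refine Mk.step hget (fun d hd => hav d ?_)
        have := (List.all_eq_true.1 (Bool.and_elim_right h)) d hd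
        exact (PySem.Set.contains_iff _ _).1 this
    · rw [passB] at hy; rw [if_neg h] at hy
      exact ih _ _ (fun q hq => hit q (List.mem_cons_of_mem _ hq)) hav y hy

lemma passB_flag_true : ∀ (items : List (String × List String)) (avail : PySem.Set String),
    (passB items avail true).2 = true := by
  intro items
  induction items with
  | nil => intro avail; simp [passB]
  | cons p rest ih =>
    obtain ⟨r, ds⟩ := p
    intro avail
    by_cases h : (!(PySem.Set.contains avail r) && ds.all (fun d => PySem.Set.contains avail d)) = true
    · rw [passB]; rw [if_pos h]; exact ih _
    · rw [passB]; rw [if_neg h]; exact ih _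

lemma passB_unchanged : ∀ (items : List (String × List String)) (avail : PySem.Set String),
    (passB items avail false).2 = false → (passB items avail false).1 = avail := by
  intro items
  induction items with
  | nil => intro avail _; simp [passB]
  | cons p rest ih =>
    obtain ⟨r, ds⟩ := p
    intro avail hf
    by_cases h : (!(PySem.Set.contains avail r) && ds.all (fun d => PySem.Set.contains avail d)) = true
    · exfalso
      rw [passB] at hf; rw [if_pos h] at hf
      exact absurd hf (by simp [passB_flag_true])
    · rw [passB] at hf ⊢; rw [if_neg h] at hf ⊢; exact ih _ hf

lemma passB_closed : ∀ (items : List (String × List String)) (avail : PySem.Set String),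
    (passB items avail false).2 = false →
    ∀ p ∈ items, p.1 ∈ avail ∨ ∃ d ∈ p.2, d ∉ avail := by
  intro items
  induction items with
  | nil => intro avail _ p hp; cases hp
  | cons q rest ih =>
    obtain ⟨r, ds⟩ := q
    intro avail hf p hp
    by_cases h : (!(PySem.Set.contains avail r) && ds.all (fun d => PySem.Set.contains avail d)) = true
    · exfalso
      rw [passB] at hf; rw [if_pos h] at hf
      exact absurd hf (by simp [passB_flag_true])
    · rw [passB] at hf; rw [if_neg h] at hf
      rcases List.mem_cons.1 hp with hp | hp
      · subst hp
        simp only [Bool.and_eq_true, Bool.not_eq_true', List.all_eq_true, not_and_or, not_forall] at h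
        rcases h with h | h
        · left
          have : PySem.Set.contains avail r = true := by
            cases hc : PySem.Set.contains avail r
            · rw [hc] at h; cases h rfl
            · rfl
          exact (PySem.Set.contains_iff _ _).1 this
        · right
          obtain ⟨d, hd, hdc⟩ := h
          exact ⟨d, hd, fun hmem => hdc ((PySem.Set.contains_iff _ _).2 hmem)⟩
      · exact ih _ hf p hp

lemma passB_growth : ∀ (items : List (String × List String)) (avail : PySem.Set String),
    (passB items avail false).2 = true →
    ∃ r, r ∈ items.map Prod.fst ∧ r ∉ avail ∧ r ∈ (passB items avail false).1 := by
  intro items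
  induction items with
  | nil => intro avail hf; rw [passB] at hf; simp at hf
  | cons q rest ih =>
    obtain ⟨r, ds⟩ := q
    intro avail hf
    by_cases h : (!(PySem.Set.contains avail r) && ds.all (fun d => PySem.Set.contains avail d)) = true
    · refine ⟨r, by simp, ?_, ?_⟩
      · intro hmem
        have := Bool.and_elim_left h
        simp only [Bool.not_eq_true'] at this
        rw [(PySem.Set.contains_iff _ _).2 hmem] at this; cases this
      · rw [passB]; rw [if_pos h]
        exact passB_mono _ _ _ r ((PySem.Set.mem_add _ _ _).2 (Or.inr rfl))
    · rw [passB] at hf; rw [if_neg h] at hf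
      obtain ⟨r', h1, h2, h3⟩ := ih _ hf
      refine ⟨r', by simp [h1], h2, ?_⟩
      rw [passB]; rw [if_neg h]; exact h3

lemma filter_length_lt {l : List String} {p q : String → Bool} (r : String)
    (hr : r ∈ l) (hpr : p r = true) (hqr : q r = false) (hqp : ∀ a, q a = true → p a = true) :
    (l.filter q).length < (l.filter p).length := by
  induction l with
  | nil => cases hr
  | cons a l ih =>
    rcases List.mem_cons.1 hr with h | h
    · subst h
      simp only [List.filter_cons, hqr, hpr]
      have : (l.filter q).length ≤ (l.filter p).length := by
        rw [← List.countP_eq_length_filter, ← List.countP_eq_length_filter]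
        exact List.countP_mono_left (fun a _ => hqp a)
      simpa using Nat.lt_succ_of_le this
    · have hlt := ih h
      simp only [List.filter_cons]
      cases hq : q a
      · cases hp : p a
        · simpa using hlt
        · simpa using Nat.lt_succ_of_lt hlt
      · rw [hqp a hq]
        simpa using Nat.succ_lt_succ hlt

lemma loopB_reaches (items : List (String × List String)) :
    ∀ (fuel : Nat) (avail : PySem.Set String),
      ((items.map Prod.fst).filter (fun k => !(PySem.Set.contains avail k))).length + 1 ≤ fuel →
      (∀ y ∈ avail, y ∈ loopB items fuel avail) ∧
      (∀ p ∈ items, p.1 ∈ loopB items fuel avail ∨ ∃ d ∈ p.2, d ∉ loopB items fuel avail) := by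
  intro fuel
  induction fuel with
  | zero => intro avail hfu; omega
  | succ f ih =>
    intro avail hfu
    rcases hpb : passB items avail false with ⟨a', ch⟩
    cases ch
    · -- pass changed nothing: avail is the final, closed set
      have hunch : a' = avail := by
        have := passB_unchanged items avail (by rw [hpb])
        rw [hpb] at this; exact this
      have hcl := passB_closed items avail (by rw [hpb])
      constructor
      · intro y hy; rw [loopB, hpb, hunch]; exact hy
      · intro p hp; rw [loopB, hpb, hunch]; exact hcl p hp
    · -- pass added something: the unreached-key measure strictly decreased
      obtain ⟨r, hr1, hr2, hr3⟩ := passB_growth items avail (by rw [hpb])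
      rw [hpb] at hr3
      have hsub : ∀ y ∈ avail, y ∈ a' := by
        intro y hy
        have := passB_mono items avail false y hy
        rw [hpb] at this; exact this
      have hlt : ((items.map Prod.fst).filter (fun k => !(PySem.Set.contains a' k))).length <
          ((items.map Prod.fst).filter (fun k => !(PySem.Set.contains avail k))).length := by
        refine filter_length_lt r hr1 ?_ ?_ ?_
        · simp only [Bool.not_eq_true']
          cases hc : PySem.Set.contains avail r
          · rfl
          · exact absurd ((PySem.Set.contains_iff _ _).1 hc) hr2
        · simp only [Bool.not_eq_false']
          exact (PySem.Set.contains_iff _ _).2 hr3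
        · intro a ha
          simp only [Bool.not_eq_true'] at ha ⊢
          cases hc : PySem.Set.contains avail a
          · rfl
          · exfalso
            have : a ∈ a' := hsub a ((PySem.Set.contains_iff _ _).1 hc)
            rw [(PySem.Set.contains_iff _ _).2 this] at ha; cases ha
      have ⟨ihm, ihc⟩ := ih a' (by omega)
      constructor
      · intro y hy; rw [loopB, hpb]; exact ihm y (hsub y hy)
      · intro p hp; rw [loopB, hpb]; exact ihc p hp

lemma loopB_sound (rm : PySem.Dict String (List String)) (sup0 : List String)
    (items : List (String × List String)) (hitems : ∀ p ∈ items, rm.get? p.1 = some p.2) :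
    ∀ (fuel : Nat) (avail : PySem.Set String), (∀ y ∈ avail, Mk rm sup0 y) →
      ∀ y ∈ loopB items fuel avail, Mk rm sup0 y := by
  intro fuel
  induction fuel with
  | zero => intro avail hav y hy; exact hav y (by simpa [loopB] using hy)
  | succ f ih =>
    intro avail hav y hy
    rw [loopB] at hy
    rcases hpb : passB items avail false with ⟨a', ch⟩
    rw [hpb] at hy
    have ha' : ∀ z ∈ a', Mk rm sup0 z := by
      intro z hz
      exact passB_sound rm sup0 items avail false hitems hav z (by rw [hpb]; exact hz)
    cases ch
    · exact ha' y hy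
    · exact ih a' ha' y hy

-- ===== assembly =====
theorem findAllRecipes_dfs_spec : Claim_equal_findAllRecipes_dfs := by
  intro recipes ingredients supplies _
  show findAllRecipes_dfs recipes ingredients supplies
      = findAllRecipes_dfs_alt recipes ingredients supplies
  -- the common recipe map
  have hrm_nodup : ((recipes.zip ingredients).foldl (fun d p => d.insert p.1 p.2)
      (PySem.Dict.empty : PySem.Dict String (List String))).keys.Nodup := by
    exact PySem.Dict.nodup_keys_foldl_insert_key (recipes.zip ingredients) Prod.fst
      (fun _ p => p.2) PySem.Dict.empty (by simp)
  generalize hRM : (recipes.zip ingredients).foldl (fun d p => d.insert p.1 p.2)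
      (PySem.Dict.empty : PySem.Dict String (List String)) = RM at hrm_nodup
  have hkeys : RM.keys = PySem.Set.ofList ((recipes.zip ingredients).map Prod.fst) := by
    rw [← hRM]
    rw [PySem.Dict.keys_foldl_insert_key (recipes.zip ingredients) Prod.fst (fun _ p => p.2)
      PySem.Dict.empty]
    rw [PySem.Dict.keys_empty, PySem.Set.update_nil_left]
  have hKbound : RM.keys.length ≤ recipes.length := by
    rw [hkeys]
    calc (PySem.Set.ofList ((recipes.zip ingredients).map Prod.fst)).length
        ≤ ((recipes.zip ingredients).map Prod.fst).length := PySem.Set.length_ofList_le _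
      _ = (recipes.zip ingredients).length := List.length_map _
      _ ≤ recipes.length := by rw [List.length_zip]; omega
  have hitems : ∀ p ∈ RM.items, RM.get? p.1 = some p.2 := by
    intro p hp
    obtain ⟨k, v⟩ := p
    exact PySem.Dict.get?_of_mem_items _ hp hrm_nodup
  have hmapfst : RM.items.map Prod.fst = RM.keys := rfl
  -- B's final availability set
  have hfuel : ((RM.items.map Prod.fst).filter
      (fun k => !(PySem.Set.contains (PySem.Set.ofList supplies) k))).length + 1
      ≤ recipes.length + 1 := by
    have h1 := List.length_filter_le
      (fun k => !(PySem.Set.contains (PySem.Set.ofList supplies) k)) (RM.items.map Prod.fst)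
    rw [hmapfst] at h1 ⊢
    omega
  have hreach := loopB_reaches RM.items (recipes.length + 1) (PySem.Set.ofList supplies) hfuel
  have hsound := loopB_sound RM supplies RM.items hitems (recipes.length + 1)
    (PySem.Set.ofList supplies)
    (fun y hy => Mk.sup ((PySem.Set.mem_ofList _ _).1 hy))
  have hcomplete : ∀ y, Mk RM supplies y →
      y ∈ loopB RM.items (recipes.length + 1) (PySem.Set.ofList supplies) := by
    intro y hy
    induction hy with
    | sup h => exact hreach.1 _ ((PySem.Set.mem_ofList _ _).2 h)
    | step hg hds ih =>
      have hpair := PySem.Dict.mem_items_of_get?_eq_some _ hg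
      rcases hreach.2 _ hpair with h | ⟨d, hd, hnotin⟩
      · exact h
      · exact absurd (ih d hd) hnotin
  have hp : ∀ r, (PySem.Set.contains
      (loopB RM.items (recipes.length + 1) (PySem.Set.ofList supplies)) r = true)
      ↔ Mk RM supplies r := by
    intro r
    constructor
    · intro h; exact hsound r ((PySem.Set.contains_iff _ _).1 h)
    · intro h; exact (PySem.Set.contains_iff _ _).2 (hcomplete r h)
  have hInv0 : InvA RM supplies ⟨PySem.Dict.empty, PySem.Set.empty, PySem.Set.ofList supplies⟩ := by
    refine ⟨?_, ?_, ?_⟩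
    · intro x b h; rw [PySem.Dict.get?_empty] at h; cases h
    · intro x hx; exact Mk.sup ((PySem.Set.mem_ofList _ _).1 hx)
    · intro x hx; exact (PySem.Set.mem_ofList _ _).2 hx
  have hA := foldA_filter RM supplies (recipes.length + 1)
    (fun r => PySem.Set.contains
      (loopB RM.items (recipes.length + 1) (PySem.Set.ofList supplies)) r)
    hp (by omega) recipes []
    ⟨PySem.Dict.empty, PySem.Set.empty, PySem.Set.ofList supplies⟩ hInv0 rfl
  rw [List.nil_append] at hA
  calc findAllRecipes_dfs recipes ingredients supplies
      = recipes.filter (fun r => PySem.Set.contains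
          (loopB RM.items (recipes.length + 1) (PySem.Set.ofList supplies)) r) := by
        rw [show findAllRecipes_dfs recipes ingredients supplies
          = (recipes.foldl (fun acc r =>
              match helperA ((recipes.zip ingredients).foldl (fun d p => d.insert p.1 p.2)
                PySem.Dict.empty) (recipes.length + 1) r acc.2 with
              | (b, st') => (if b then acc.1 ++ [r] else acc.1, st'))
            (([] : List String),
              ⟨PySem.Dict.empty, PySem.Set.empty, PySem.Set.ofList supplies⟩)).1 from rfl]
        rw [hRM]
        exact hA
    _ = findAllRecipes_dfs_alt recipes ingredients supplies := by
        rw [show findAllRecipes_dfs_alt recipes ingredients supplies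
          = recipes.filter (fun r => PySem.Set.contains
              (loopB ((recipes.zip ingredients).foldl (fun d p => d.insert p.1 p.2)
                PySem.Dict.empty).items (recipes.length + 1)
                (PySem.Set.ofList supplies)) r) from rfl]
        rw [hRM]
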